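-- pv_equiv track=rewrite | github.com/naziktazik13/jstris_ai | v5.py | identify_tetromino_from_shadow
-- ===== SOURCE A (Python) =====
-- TETROMINO_SHAPES = {
--     'I': [(0, 0), (0, 1), (0, 2), (0, 3)],  # I-блок (палка)
--     'O': [(0, 0), (0, 1), (1, 0), (1, 1)],  # O-блок (квадрат)
--     'T': [(0, 1), (1, 0), (1, 1), (1, 2)],  # T-блок
--     'S': [(0, 1), (0, 2), (1, 0), (1, 1)],  # S-блок
--     'Z': [(0, 0), (0, 1), (1, 1), (1, 2)],  # Z-блок
--     'J': [(0, 0), (1, 0), (1, 1), (1, 2)],  # J-блок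
--     'L': [(0, 2), (1, 0), (1, 1), (1, 2)]   # L-блок
-- }
--
-- def identify_tetromino_from_shadow(shadow_cells):
--     """
--     Определяет тип тетромино по форме тени
--     Возвращает нормализованную форму полного тетромино
--     """
--     if not shadow_cells:
--         return None
--
--     # Нормализуем тень
--     normalized_shadow = set(shadow_cells[0])
--
--     # Перебираем все возможные тетромино
--     for shape_name, shape in TETROMINO_SHAPES.items():
--         # Генерируем все возможные повороты для сравнения
--         rotations = get_all_possible_rotations(shape)
--         for rotation in rotations:
--             rotation_set = set(rotation)
--             # Если форма тени совпадает с текущей формой тетромино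
--             if len(rotation_set) == len(normalized_shadow) and all(cell in rotation_set for cell in normalized_shadow):
--                 return rotation
--
--     # Если не удалось определить форму, возвращаем саму тень как форму
--     return shadow_cells[0]
--
-- def get_all_possible_rotations(piece_shape):
--     """Возвращает все возможные повороты фигуры"""
--     if not piece_shape:
--         return []
--
--     rotations = []
--     current_rotation = piece_shape
--
--     # Для симметрии, добавляем до 4 поворотов (0°, 90°, 180°, 270°)
--     for _ in range(4):
--         rotations.append(current_rotation)
--         # Поворот на 90° по часовой стрелке
--         current_rotation = [(c, -r) for r, c in current_rotation]
--         # Нормализация после поворота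
--         min_r = min(r for r, _ in current_rotation)
--         min_c = min(c for _, c in current_rotation)
--         current_rotation = [(r - min_r, c - min_c) for r, c in current_rotation]
--
--         # Проверка, есть ли уже такой поворот
--         if current_rotation in rotations:
--             break
--
--     return rotations
-- ===== SOURCE B (Python) =====
-- TETROMINO_SHAPES = {
--     'I': [(0, 0), (0, 1), (0, 2), (0, 3)],
--     'O': [(0, 0), (0, 1), (1, 0), (1, 1)],
--     'T': [(0, 1), (1, 0), (1, 1), (1, 2)],
--     'S': [(0, 1), (0, 2), (1, 0), (1, 1)],
--     'Z': [(0, 0), (0, 1), (1, 1), (1, 2)],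
--     'J': [(0, 0), (1, 0), (1, 1), (1, 2)],
--     'L': [(0, 2), (1, 0), (1, 1), (1, 2)]
-- }
--
--
-- def _rotations(shape):
--     """The four normalized 90-degree rotations of a shape (duplicates allowed)."""
--     rots = []
--     cur = shape
--     for _ in range(4):
--         rots.append(cur)
--         cur = [(c, -r) for r, c in cur]
--         min_r = min(r for r, _ in cur)
--         min_c = min(c for _, c in cur)
--         cur = [(r - min_r, c - min_c) for r, c in cur]
--     return rots
--
--
-- # Prebuilt index: frozenset of a rotation -> that rotation list (first one wins).
-- _TABLE = {}
-- for _shape in TETROMINO_SHAPES.values():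
--     for _rot in _rotations(_shape):
--         _TABLE.setdefault(frozenset(_rot), _rot)
--
--
-- def identify_tetromino_from_shadow(shadow_cells):
--     if not shadow_cells:
--         return None
--     first = shadow_cells[0]
--     return _TABLE.get(frozenset(first), first)
-- ===== Notes on version B (the rewrite author's own statement) =====
-- stated objective: faster
-- what changed: B precomputes once, at module load, a dict mapping frozenset(rotation) to the first rotation carrying that cell set (setdefault preserves A's first-match order), so each call is a single hash lookup with shadow_cells[0] as fallback, instead of A's per-call regeneration of all rotations of all 7 shapes and a nested scan with set comparisons.
import Mathlib
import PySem

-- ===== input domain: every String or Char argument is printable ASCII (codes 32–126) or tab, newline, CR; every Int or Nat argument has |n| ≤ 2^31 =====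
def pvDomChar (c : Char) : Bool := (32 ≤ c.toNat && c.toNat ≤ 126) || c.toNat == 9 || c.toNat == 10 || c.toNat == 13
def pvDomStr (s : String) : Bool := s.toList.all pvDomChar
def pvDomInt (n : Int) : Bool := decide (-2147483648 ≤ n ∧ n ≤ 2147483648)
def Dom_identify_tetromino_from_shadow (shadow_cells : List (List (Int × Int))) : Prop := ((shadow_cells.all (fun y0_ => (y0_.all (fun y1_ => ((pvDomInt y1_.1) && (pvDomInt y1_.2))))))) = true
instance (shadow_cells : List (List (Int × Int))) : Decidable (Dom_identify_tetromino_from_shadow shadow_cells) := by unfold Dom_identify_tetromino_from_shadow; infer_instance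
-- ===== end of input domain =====

-- B replaces A's per-call nested scan over all regenerated rotations by a one-time
-- table keyed by the rotation's cell set, looked up once per call (objective: faster).

-- ===== PORT A =====
-- module constant TETROMINO_SHAPES (dict in insertion order)
def pvShapes : List (String × List (Int × Int)) :=
  [("I", [(0, 0), (0, 1), (0, 2), (0, 3)]),
   ("O", [(0, 0), (0, 1), (1, 0), (1, 1)]),
   ("T", [(0, 1), (1, 0), (1, 1), (1, 2)]),
   ("S", [(0, 1), (0, 2), (1, 0), (1, 1)]),
   ("Z", [(0, 0), (0, 1), (1, 1), (1, 2)]),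
   ("J", [(0, 0), (1, 0), (1, 1), (1, 2)]),
   ("L", [(0, 2), (1, 0), (1, 1), (1, 2)])]

-- one 90°-clockwise rotation plus normalization (the three lines both Pythons share);
-- Python's min over a nonempty int generator is List.min?; .getD 0 is unreachable (cur nonempty)
def pvRotate90 (cur : List (Int × Int)) : List (Int × Int) :=
  let cur1 := cur.map (fun rc => (rc.2, -rc.1))
  let minR := ((cur1.map (fun p => p.1)).min?).getD 0
  let minC := ((cur1.map (fun p => p.2)).min?).getD 0
  cur1.map (fun p => (p.1 - minR, p.2 - minC))

-- A's get_all_possible_rotations: loop over range 4 with a break flag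
def pvGetAllRotations (piece_shape : List (Int × Int)) : List (List (Int × Int)) :=
  if piece_shape.isEmpty then []
  else
    ((List.range 4).foldl
      (fun st _ =>
        if st.2.2 then st
        else
          let rots := st.1 ++ [st.2.1]
          let cur := pvRotate90 st.2.1
          (rots, cur, decide (cur ∈ rots)))
      ([], piece_shape, false)).1

-- early 'return' inside the nested loops is encoded by the first-match combinator
def pvFirstSome {β : Type} (acc next : Option β) : Option β :=
  match acc with | some r => some r | none => next

def identify_tetromino_from_shadow (shadow_cells : List (List (Int × Int))) : Option (List (Int × Int)) :=
  match shadow_cells with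
  | [] => none
  | first :: _ =>
    match pvShapes.foldl
        (fun acc sh =>
          pvFirstSome acc
            ((pvGetAllRotations sh.2).foldl
              (fun acc2 rotation =>
                pvFirstSome acc2
                  (if (PySem.Set.ofList rotation).length == (PySem.Set.ofList first).length
                      && (PySem.Set.ofList first).all (fun cell => decide (cell ∈ PySem.Set.ofList rotation))
                  then some rotation else none))
              none))
        none with
    | some r => some r
    | none => some first

-- ===== PORT B =====
-- B's _rotations: the four normalized rotations, no break
def pvRotations4 (shape : List (Int × Int)) : List (List (Int × Int)) :=
  ((List.range 4).foldl (fun st _ => (st.1 ++ [st.2], pvRotate90 st.2)) ([], shape)).1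

-- B's module-level table: frozenset(rotation) -> rotation, first one wins (setdefault);
-- the frozenset key is PySem.Set.ofList, key equality is Python set equality (PySem.Set.equal)
def pvTable : List (PySem.Set (Int × Int) × List (Int × Int)) :=
  pvShapes.foldl
    (fun tbl sh =>
      (pvRotations4 sh.2).foldl
        (fun tbl rot =>
          let k := PySem.Set.ofList rot
          if tbl.any (fun kv => PySem.Set.equal kv.1 k) then tbl else tbl ++ [(k, rot)])
        tbl)
    []

def identify_tetromino_from_shadow_alt (shadow_cells : List (List (Int × Int))) : Option (List (Int × Int)) :=
  match shadow_cells with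
  | [] => none
  | first :: _ =>
    match pvTable.find? (fun kv => PySem.Set.equal (PySem.Set.ofList first) kv.1) with
    | some kv => some kv.2
    | none => some first

-- ===== PRECONDITION & SPEC =====
def Spec_identify_tetromino_from_shadow (shadow_cells : List (List (Int × Int))) (out : Option (List (Int × Int))) : Prop := out = identify_tetromino_from_shadow_alt shadow_cells
instance (shadow_cells : List (List (Int × Int))) (out : Option (List (Int × Int))) : Decidable (Spec_identify_tetromino_from_shadow shadow_cells out) := by unfold Spec_identify_tetromino_from_shadow; infer_instance

-- ===== CLAIM (what is proved, stated in full; the proofs are below) =====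
def Claim_equal_identify_tetromino_from_shadow : Prop := ∀ (shadow_cells : List (List (Int × Int))), Dom_identify_tetromino_from_shadow shadow_cells → Spec_identify_tetromino_from_shadow shadow_cells (identify_tetromino_from_shadow shadow_cells)

-- ===== LEMMAS AND PROOFS =====

-- a first-match fold that has already found a value keeps it
theorem pvFoldlFMSome {α β : Type} (g : α → Option β) (l : List α) (r : β) :
    l.foldl (fun acc x => pvFirstSome acc (g x)) (some r) = some r := by
  induction l with
  | nil => rfl
  | cons x l ih => simpa [pvFirstSome] using ih

-- the inner Python loop "return rotation on first hit" is List.find?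
theorem pvFoldlIfFind {α : Type} (p : α → Bool) (l : List α) :
    l.foldl (fun acc x => pvFirstSome acc (if p x then some x else none)) none
      = l.find? p := by
  induction l with
  | nil => rfl
  | cons x l ih =>
    rw [List.foldl_cons,
      show pvFirstSome (none : Option α) (if p x then some x else none)
          = (if p x then some x else none) from rfl]
    by_cases h : p x
    · rw [if_pos h, pvFoldlFMSome (fun x => if p x then some x else none)]
      simp [h]
    · rw [if_neg h, ih]
      simp [h]

-- the nested Python loops are List.find? over the flattened rotation list
theorem pvFoldlOuterFind {γ α : Type} (rots : γ → List α) (p : α → Bool) (l : List γ) :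
    l.foldl
      (fun acc sh =>
        pvFirstSome acc
          ((rots sh).foldl
            (fun acc2 x => pvFirstSome acc2 (if p x then some x else none))
            none))
      none
    = (l.flatMap rots).find? p := by
  induction l with
  | nil => rfl
  | cons sh l ih =>
    rw [List.foldl_cons]
    show List.foldl _ (pvFirstSome none ((rots sh).foldl _ none)) l = _
    rw [show (pvFirstSome none ((rots sh).foldl (fun acc2 x => pvFirstSome acc2 (if p x then some x else none)) none)) = (rots sh).foldl (fun acc2 x => pvFirstSome acc2 (if p x then some x else none)) none from rfl]
    rw [pvFoldlIfFind, List.flatMap_cons, List.find?_append]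
    cases h : (rots sh).find? p with
    | some r => simp [pvFoldlFMSome]
    | none => simpa using ih

theorem pvFindCongr {α : Type} {p q : α → Bool} (l : List α) (h : ∀ a ∈ l, p a = q a) :
    l.find? p = l.find? q := by
  induction l with
  | nil => rfl
  | cons x l ih =>
    have hx := h x (by simp)
    by_cases hp : p x
    · simp [List.find?, hp, hx ▸ hp]
    · have hq : q x = false := by rw [← hx]; simpa using hp
      simp [List.find?, hp, hq]
      exact ih (fun a ha => h a (by simp [ha]))

-- A's length-and-subset test on deduplicated cell lists IS Python's set equality
theorem pvCondEqEqual (S K : List (Int × Int)) (hS : S.Nodup) (hK : K.Nodup) :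
    ((K.length == S.length) && S.all (fun c => decide (c ∈ K))) = PySem.Set.equal S K := by
  rw [Bool.eq_iff_iff]
  simp only [Bool.and_eq_true, beq_iff_eq, List.all_eq_true, decide_eq_true_eq,
    PySem.Set.equal_iff]
  constructor
  · rintro ⟨hlen, hsub⟩ x
    have hSK : S.toFinset ⊆ K.toFinset := by
      intro y hy
      exact List.mem_toFinset.mpr (hsub y (List.mem_toFinset.mp hy))
    have hcard : K.toFinset.card ≤ S.toFinset.card := by
      rw [List.toFinset_card_of_nodup hS, List.toFinset_card_of_nodup hK]
      omega
    have := Finset.eq_of_subset_of_card_le hSK hcard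
    constructor
    · intro hx; exact hsub x hx
    · intro hx
      have : x ∈ S.toFinset := this ▸ List.mem_toFinset.mpr hx
      exact List.mem_toFinset.mp this
  · intro hiff
    have hperm : S.Perm K := (List.perm_ext_iff_of_nodup hS hK).mpr hiff
    exact ⟨(hperm.length_eq).symm, fun c hc => (hiff c).mp hc⟩

-- single-fold form of B's table-building loop (generic accumulator)
def pvBuild (l : List (List (Int × Int))) (tbl : List (PySem.Set (Int × Int) × List (Int × Int))) :
    List (PySem.Set (Int × Int) × List (Int × Int)) :=
  l.foldl
    (fun tbl rot =>
      let k := PySem.Set.ofList rot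
      if tbl.any (fun kv => PySem.Set.equal kv.1 k) then tbl else tbl ++ [(k, rot)])
    tbl

theorem pvBuildAppend (l : List (List (Int × Int))) (tbl : List (PySem.Set (Int × Int) × List (Int × Int))) :
    ∃ r, pvBuild l tbl = tbl ++ r := by
  induction l generalizing tbl with
  | nil => exact ⟨[], by simp [pvBuild]⟩
  | cons rot l ih =>
    have hstep : pvBuild (rot :: l) tbl
        = pvBuild l (if tbl.any (fun kv => PySem.Set.equal kv.1 (PySem.Set.ofList rot)) then tbl
                     else tbl ++ [(PySem.Set.ofList rot, rot)]) := rfl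
    rw [hstep]
    by_cases h : tbl.any (fun kv => PySem.Set.equal kv.1 (PySem.Set.ofList rot))
    · simpa [h] using ih tbl
    · rw [if_neg h]
      obtain ⟨r, hr⟩ := ih (tbl ++ [(PySem.Set.ofList rot, rot)])
      exact ⟨[(PySem.Set.ofList rot, rot)] ++ r, by rw [hr, List.append_assoc]⟩

-- the key lemma: first-match search in the deduplicated table equals first-match
-- search in the full rotation list, for any predicate that respects set equality
theorem pvBuildFind (p : PySem.Set (Int × Int) → Bool)
    (hresp : ∀ k k', PySem.Set.equal k k' = true → p k = p k')
    (l : List (List (Int × Int))) (tbl : List (PySem.Set (Int × Int) × List (Int × Int)))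
    (hnone : tbl.find? (fun kv => p kv.1) = none) :
    (pvBuild l tbl).find? (fun kv => p kv.1)
      = (l.find? (fun rot => p (PySem.Set.ofList rot))).map (fun rot => (PySem.Set.ofList rot, rot)) := by
  induction l generalizing tbl with
  | nil => simpa [pvBuild] using hnone
  | cons rot l ih =>
    have hstep : pvBuild (rot :: l) tbl
        = pvBuild l (if tbl.any (fun kv => PySem.Set.equal kv.1 (PySem.Set.ofList rot)) then tbl
                     else tbl ++ [(PySem.Set.ofList rot, rot)]) := rfl
    rw [hstep]
    by_cases hany : tbl.any (fun kv => PySem.Set.equal kv.1 (PySem.Set.ofList rot))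
    · -- duplicate set: skipped by the table, and p is false on it (it is false on the
      -- earlier entry with the same set, which find? already rejected)
      obtain ⟨kv, hkv, heq⟩ := List.any_eq_true.mp hany
      have hfalse : ∀ kv ∈ tbl, ¬ p kv.1 = true := by
        simpa using List.find?_eq_none.mp hnone
      have hpk : p (PySem.Set.ofList rot) = false := by
        rw [← hresp kv.1 _ heq]
        simpa using hfalse kv hkv
      rw [if_pos hany, List.find?_cons, hpk]
      exact ih tbl hnone
    · rw [if_neg hany]
      by_cases hp : p (PySem.Set.ofList rot)
      · have htbl' : (tbl ++ [(PySem.Set.ofList rot, rot)]).find? (fun kv => p kv.1)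
            = some (PySem.Set.ofList rot, rot) := by
          rw [List.find?_append, hnone]; simpa [Option.orElse] using hp
        obtain ⟨r, hr⟩ := pvBuildAppend l (tbl ++ [(PySem.Set.ofList rot, rot)])
        rw [hr, List.find?_append, htbl']
        simp [hp]
      · have htbl' : (tbl ++ [(PySem.Set.ofList rot, rot)]).find? (fun kv => p kv.1) = none := by
          rw [List.find?_append, hnone]; simpa [Option.orElse] using hp
        rw [List.find?_cons]
        simp only [hp]
        exact ih _ htbl'

-- B's nested table-building loop is pvBuild of the flattened rotation list (both closed)
theorem pvTableEq :
    pvTable = pvBuild (pvShapes.flatMap (fun sh => pvGetAllRotations sh.2)) [] := by decide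

-- Python set equality is transitive on the left argument
theorem pvEqualResp (S : PySem.Set (Int × Int)) :
    ∀ k k', PySem.Set.equal k k' = true → PySem.Set.equal S k = PySem.Set.equal S k' := by
  intro k k' h
  rw [Bool.eq_iff_iff]
  simp only [PySem.Set.equal_iff] at *
  constructor <;> intro hh x <;> rw [hh x] <;> [exact h x; exact (h x).symm]

-- pvFoldlOuterFind specialized to port A's loops
theorem pvOuterSpec (first : List (Int × Int)) :
    pvShapes.foldl
      (fun acc sh =>
        pvFirstSome acc
          ((pvGetAllRotations sh.2).foldl
            (fun acc2 rotation =>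
              pvFirstSome acc2
                (if (PySem.Set.ofList rotation).length == (PySem.Set.ofList first).length
                    && (PySem.Set.ofList first).all (fun cell => decide (cell ∈ PySem.Set.ofList rotation))
                then some rotation else none))
            none))
      none
    = (pvShapes.flatMap (fun sh => pvGetAllRotations sh.2)).find?
        (fun rotation => (PySem.Set.ofList rotation).length == (PySem.Set.ofList first).length
          && (PySem.Set.ofList first).all (fun cell => decide (cell ∈ PySem.Set.ofList rotation))) :=
  pvFoldlOuterFind (fun sh => pvGetAllRotations sh.2)
    (fun rotation => (PySem.Set.ofList rotation).length == (PySem.Set.ofList first).length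
      && (PySem.Set.ofList first).all (fun cell => decide (cell ∈ PySem.Set.ofList rotation)))
    pvShapes

-- character of port A on a nonempty input
theorem pvAChar (first : List (Int × Int)) (rest : List (List (Int × Int))) :
    identify_tetromino_from_shadow (first :: rest)
      = match (pvShapes.flatMap (fun sh => pvGetAllRotations sh.2)).find?
            (fun rot => PySem.Set.equal (PySem.Set.ofList first) (PySem.Set.ofList rot)) with
        | some r => some r
        | none => some first := by
  simp only [identify_tetromino_from_shadow]
  rw [pvOuterSpec first]
  rw [pvFindCongr _ (fun rot _ =>
    pvCondEqEqual (PySem.Set.ofList first) (PySem.Set.ofList rot)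
      (PySem.Set.nodup_ofList first) (PySem.Set.nodup_ofList rot))]

-- ===== VERDICT (by name: the statement is the Claim_ definition above) =====
theorem identify_tetromino_from_shadow_spec : Claim_equal_identify_tetromino_from_shadow := by
  intro shadow_cells _
  unfold Spec_identify_tetromino_from_shadow
  cases shadow_cells with
  | nil => rfl
  | cons first rest =>
    rw [pvAChar]
    show _ = (match pvTable.find? (fun kv => PySem.Set.equal (PySem.Set.ofList first) kv.1) with
              | some kv => some kv.2 | none => some first)
    rw [pvTableEq, pvBuildFind _ (pvEqualResp (PySem.Set.ofList first)) _ [] rfl]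
    cases (pvShapes.flatMap (fun sh => pvGetAllRotations sh.2)).find?
        (fun rot => PySem.Set.equal (PySem.Set.ofList first) (PySem.Set.ofList rot)) with
    | none => rfl
    | some r => rfl
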